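-- pv_equiv track=rewrite | github.com/widdowquinn/aoc2025 | day02.py | generate_invalid_ids
-- ===== SOURCE A (Python) =====
-- def generate_invalid_ids(minlen, maxlen):
--     """Return a set of invalid IDs of lengths minlen and maxlen
--
--     This approach generates all invalid values - those where the number
--     is a repeated sequence of any smaller set of numbers - between minlen
--     and maxlen digits in length.
--
--     We consider all numbers of length minlen to length maxlen to be test values,
--     and note that the repeated elements must be a length that exactly divides
--     the length of the test value. Then, rather than generate all test values,
--     we generate all values that could be composed of repeated elements. So,
--     instead of, e.g. generating all nine-digit numbers (of which there are
--     1e8 - 1e7 = 90e6), we can generate all 9-fold repeats of the digits 1 to 9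
--     (nine numbers), and all the three-fold repeats of all the three digit numbers
--     (100-999), i.e. fewer than 1e4 numbers, which is a bit quicker.
--
--     We could refactor out the generation of all invalid IDs for a single number
--     length into its own function, and use caching on that to speed things
--     up further, but this is pretty quick already.
--     """
--     invalid = []  # list of invalid IDs
--
--     # Iterate over all test number digit lengths in the passed range
--     for numlen in range(minlen, maxlen + 1):
--         for elemlen in range(
--             1, (numlen // 2) + 1
--         ):  # Element length can be at maximum half the digits of the test number
--             if (
--                 numlen % elemlen == 0
--             ):  # Element sizes must divide the test number length
--                 repeats = numlen // elemlen  # Number of element repeats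
--                 # Generate all invalid repeat combinations and add them to the list
--                 for val in range(10 ** (elemlen - 1), 10**elemlen):
--                     num = int(str(val) * repeats)
--                     invalid.append(int(str(val) * repeats))
--
--     return set(invalid)
-- ===== SOURCE B (Python) =====
-- def generate_invalid_ids(minlen, maxlen):
--     """Return the set of repeated-block 'invalid' IDs with minlen..maxlen digits.
--
--     Instead of scanning every candidate block length up to numlen // 2 with a
--     divisibility test, find the proper divisors of each length by trial
--     division up to its square root (collecting each divisor together with its
--     cofactor), and add the repeated-block numbers straight into a set.
--     """
--     invalid = set()
--     for numlen in range(minlen, maxlen + 1):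
--         small = []  # proper divisors d of numlen with d*d <= numlen, ascending
--         large = []  # their cofactors above the square root, descending
--         e = 1
--         while e * e <= numlen:
--             if numlen % e == 0:
--                 if e != numlen:
--                     small.append(e)
--                 cof = numlen // e
--                 if cof != e and cof != numlen:
--                     large.append(cof)
--             e += 1
--         for elemlen in small + large[::-1]:
--             repeats = numlen // elemlen
--             for val in range(10 ** (elemlen - 1), 10 ** elemlen):
--                 invalid.add(int(str(val) * repeats))
--     return invalid
-- ===== Notes on version B (the rewrite author's own statement) =====
-- stated objective: alternative
-- what changed: B finds each length's proper divisors by trial division up to the square root (pairing each divisor with its cofactor) instead of scanning all block lengths up to numlen//2 with a divisibility test, and inserts the repeated-block numbers directly into a set instead of collecting a list and converting it at the end.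
import Mathlib
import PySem

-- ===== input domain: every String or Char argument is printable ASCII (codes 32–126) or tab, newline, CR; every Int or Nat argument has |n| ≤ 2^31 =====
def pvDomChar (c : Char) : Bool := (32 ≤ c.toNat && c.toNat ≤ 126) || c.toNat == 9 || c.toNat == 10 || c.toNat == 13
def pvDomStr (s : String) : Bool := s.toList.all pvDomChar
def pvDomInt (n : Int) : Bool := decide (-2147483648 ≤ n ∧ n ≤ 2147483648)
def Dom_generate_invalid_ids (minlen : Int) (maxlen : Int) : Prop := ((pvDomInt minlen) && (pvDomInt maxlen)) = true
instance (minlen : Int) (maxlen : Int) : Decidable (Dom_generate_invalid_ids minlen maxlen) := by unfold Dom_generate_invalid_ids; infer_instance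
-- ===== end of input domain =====

-- B finds each length's proper divisors by trial division up to the square root instead of
-- scanning all block lengths up to numlen//2, and adds the numbers straight into a set
-- (objective: alternative decomposition; the return value is proved identical).

-- ===== PORT A =====
-- int(str(val) * repeats): string repetition is ported by hand as flattened replication
-- (exact: Python s * k concatenates k copies, the empty string for k ≤ 0); int(...) is
-- PySem.Int.ofChars?, with .getD 0 — it is never none here (the string is nonempty digits).
def generate_invalid_ids (minlen : Int) (maxlen : Int) : List Int :=
  let invalid : List Int :=
    (PySem.List.pyRange minlen (maxlen + 1) 1).foldl (fun inv numlen =>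
      (PySem.List.pyRange 1 (PySem.Int.floordiv numlen 2 + 1) 1).foldl (fun inv elemlen =>
        if PySem.Int.mod numlen elemlen == 0 then
          let repeats := PySem.Int.floordiv numlen elemlen
          (PySem.List.pyRange ((10 : Int) ^ (elemlen - 1).toNat) ((10 : Int) ^ elemlen.toNat) 1).foldl
            (fun inv val =>
              let num := (PySem.Int.ofChars? ((List.replicate repeats.toNat (PySem.Int.toChars val)).flatten)).getD 0
              inv ++ [num]) inv
        else inv) inv) []
  PySem.Set.ofList invalid

-- ===== PORT B =====
-- the while loop 'e = 1; while e * e <= numlen: …; e += 1' of Source B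
def pvDivLoop (numlen : Int) (e : Int) (small : List Int) (large : List Int) :
    List Int × List Int :=
  if _h : e * e ≤ numlen then
    let small' := if PySem.Int.mod numlen e == 0 then
        (if e ≠ numlen then small ++ [e] else small) else small
    let large' := if PySem.Int.mod numlen e == 0 then
        (let cof := PySem.Int.floordiv numlen e
         if cof ≠ e ∧ cof ≠ numlen then large ++ [cof] else large) else large
    pvDivLoop numlen (e + 1) small' large'
  else (small, large)
termination_by (numlen + 1 - e).toNat
decreasing_by
  have h1 : e ≤ numlen := by nlinarith [sq_nonneg e, sq_nonneg (e - 1)]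
  omega

-- large[::-1] is ported as List.reverse (exact: a full step -1 slice reverses the list)
def generate_invalid_ids_alt (minlen : Int) (maxlen : Int) : List Int :=
  (PySem.List.pyRange minlen (maxlen + 1) 1).foldl (fun invalid numlen =>
    let sl := pvDivLoop numlen 1 [] []
    (sl.1 ++ sl.2.reverse).foldl (fun invalid elemlen =>
      let repeats := PySem.Int.floordiv numlen elemlen
      (PySem.List.pyRange ((10 : Int) ^ (elemlen - 1).toNat) ((10 : Int) ^ elemlen.toNat) 1).foldl
        (fun invalid val =>
          PySem.Set.add invalid
            ((PySem.Int.ofChars? ((List.replicate repeats.toNat (PySem.Int.toChars val)).flatten)).getD 0))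
        invalid) invalid) []

-- ===== PRECONDITION & SPEC =====
def Spec_generate_invalid_ids (minlen : Int) (maxlen : Int) (out : List Int) : Prop := out = generate_invalid_ids_alt minlen maxlen
instance (minlen : Int) (maxlen : Int) (out : List Int) : Decidable (Spec_generate_invalid_ids minlen maxlen out) := by unfold Spec_generate_invalid_ids; infer_instance

-- ===== CLAIM (what is proved, stated in full; the proofs are below) =====
def Claim_equal_generate_invalid_ids : Prop := ∀ (minlen : Int) (maxlen : Int), Dom_generate_invalid_ids minlen maxlen → Spec_generate_invalid_ids minlen maxlen (generate_invalid_ids minlen maxlen)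


-- ===== LEMMAS AND PROOFS =====

-- the number int(str(val) * (n // e)) both ports append / add
def pvNum (n e val : Int) : Int :=
  (PySem.Int.ofChars? ((List.replicate (PySem.Int.floordiv n e).toNat (PySem.Int.toChars val)).flatten)).getD 0

-- the val-loop's output for one (numlen, elemlen) pair
def pvInner (n e : Int) : List Int :=
  (PySem.List.pyRange ((10 : Int) ^ (e - 1).toNat) ((10 : Int) ^ e.toNat) 1).map (pvNum n e)

-- A's divisor enumeration: block lengths 1 .. n // 2 dividing n
def pvDivsA (n : Int) : List Int :=
  (PySem.List.pyRange 1 (PySem.Int.floordiv n 2 + 1) 1).filter (fun e => PySem.Int.mod n e == 0)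

-- the full generated sequence (before set deduplication)
def pvGen (minlen maxlen : Int) : List Int :=
  (PySem.List.pyRange minlen (maxlen + 1) 1).flatMap (fun n => (pvDivsA n).flatMap (pvInner n))

-- closed forms of the two accumulators of pvDivLoop from counter value e
def pvDs (n e : Int) : List Int :=
  (PySem.List.pyRange e (n + 1) 1).filter
    (fun d => decide (d * d ≤ n) && (PySem.Int.mod n d == 0) && decide (d ≠ n))

def pvCs (n e : Int) : List Int :=
  ((PySem.List.pyRange e (n + 1) 1).filter
    (fun d => decide (d * d ≤ n) && (PySem.Int.mod n d == 0) &&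
      decide (PySem.Int.floordiv n d ≠ d ∧ PySem.Int.floordiv n d ≠ n))).map
    (fun d => PySem.Int.floordiv n d)

lemma pvFlatMap_if {α β : Type} (p : α → Bool) (g : α → List β) (l : List α) :
    l.flatMap (fun x => if p x then g x else []) = (l.filter p).flatMap g := by
  induction l with
  | nil => rfl
  | cons x xs ih =>
    by_cases h : p x <;> simp [List.flatMap_cons, h, ih]

-- the val loop of port A, as an append of pvInner
lemma pvValLoopA (n e : Int) (inv : List Int) :
    (PySem.List.pyRange ((10 : Int) ^ (e - 1).toNat) ((10 : Int) ^ e.toNat) 1).foldl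
      (fun inv val =>
        let num := (PySem.Int.ofChars? ((List.replicate (PySem.Int.floordiv n e).toNat (PySem.Int.toChars val)).flatten)).getD 0
        inv ++ [num]) inv = inv ++ pvInner n e :=
  PySem.List.foldl_append_singleton_eq_map (pvNum n e) _ inv

-- shape of port A: the appended list is pvGen
lemma pvShapeA (minlen maxlen : Int) :
    generate_invalid_ids minlen maxlen = PySem.Set.ofList (pvGen minlen maxlen) := by
  unfold generate_invalid_ids pvGen
  rw [PySem.List.foldl_congr_mem _ _
        (fun inv n => inv ++ (pvDivsA n).flatMap (pvInner n)) _ ?_,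
      PySem.List.foldl_append_eq_flatMap, List.nil_append]
  intro inv n _
  rw [PySem.List.foldl_congr_mem _ _
        (fun inv e => inv ++ (if PySem.Int.mod n e == 0 then pvInner n e else [])) _ ?_,
      PySem.List.foldl_append_eq_flatMap, pvFlatMap_if]
  · rfl
  · intro acc e _
    by_cases h : PySem.Int.mod n e == 0
    · simp only [h, if_true]
      exact pvValLoopA n e acc
    · simp [h]
-- folding Set.add over values f of a list is Set.update with the mapped list
lemma pvAddFold {γ : Type} (xs : List γ) (f : γ → Int) (s : PySem.Set Int) :
    xs.foldl (fun s v => PySem.Set.add s (f v)) s = PySem.Set.update s (xs.map f) := by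
  unfold PySem.Set.update
  rw [List.foldl_map]

lemma pvUpdateFold {γ : Type} (ns : List γ) (L : γ → List Int) (s : PySem.Set Int) :
    ns.foldl (fun s n => PySem.Set.update s (L n)) s = PySem.Set.update s (ns.flatMap L) := by
  induction ns generalizing s with
  | nil => simp [PySem.Set.update]
  | cons n ns ih =>
    rw [List.foldl_cons, ih, List.flatMap_cons]
    simp [PySem.Set.update, List.foldl_append]

-- for e with n < e * e, no d ≥ e passes the d * d ≤ n test
lemma pvDs_nil (n e : Int) (he : 1 ≤ e) (h : ¬ e * e ≤ n) : pvDs n e = [] := by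
  rw [pvDs, List.filter_eq_nil_iff]
  intro d hd
  have := (PySem.List.mem_pyRange_one).1 hd
  have : ¬ d * d ≤ n := by nlinarith
  simp [this]

lemma pvCs_nil (n e : Int) (he : 1 ≤ e) (h : ¬ e * e ≤ n) : pvCs n e = [] := by
  rw [pvCs, List.map_eq_nil_iff, List.filter_eq_nil_iff]
  intro d hd
  have := (PySem.List.mem_pyRange_one).1 hd
  have : ¬ d * d ≤ n := by nlinarith
  simp [this]

-- the while loop, starting at counter e ≥ 1, appends exactly pvDs / pvCs
lemma pvDivLoop_spec : ∀ (k : Nat) (n e : Int) (small large : List Int), 1 ≤ e →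
    (n + 1 - e).toNat ≤ k →
    pvDivLoop n e small large = (small ++ pvDs n e, large ++ pvCs n e) := by
  intro k
  induction k with
  | zero =>
    intro n e small large he hk
    rw [pvDivLoop]
    have hlt : n < e := by omega
    have hgt : ¬ e * e ≤ n := by nlinarith
    simp [hgt, pvDs_nil n e he hgt, pvCs_nil n e he hgt]
  | succ k ih =>
    intro n e small large he hk
    rw [pvDivLoop]
    by_cases hle : e * e ≤ n
    · have hen : e ≤ n := by nlinarith
      have hcons : PySem.List.pyRange e (n + 1) 1 = e :: PySem.List.pyRange (e + 1) (n + 1) 1 :=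
        PySem.List.pyRange_one_cons (by omega)
      have hDs : pvDs n e =
          (if decide (e * e ≤ n) && (PySem.Int.mod n e == 0) && decide (e ≠ n) then [e] else [])
            ++ pvDs n (e + 1) := by
        rw [pvDs, hcons, List.filter_cons]
        split <;> simp [pvDs]
      have hCs : pvCs n e =
          (if decide (e * e ≤ n) && (PySem.Int.mod n e == 0) &&
              decide (PySem.Int.floordiv n e ≠ e ∧ PySem.Int.floordiv n e ≠ n)
            then [PySem.Int.floordiv n e] else []) ++ pvCs n (e + 1) := by
        rw [pvCs, hcons, List.filter_cons]
        split <;> simp [pvCs]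
      rw [dif_pos hle,
          ih n (e + 1) _ _ (by omega) (by omega), hDs, hCs]
      by_cases hmod : PySem.Int.mod n e == 0
      · by_cases hne : e ≠ n
        · by_cases hc : PySem.Int.floordiv n e ≠ e ∧ PySem.Int.floordiv n e ≠ n
          · simp [hmod, hne, hc, hle]
          · simp [hmod, hne, hc, hle]
        · by_cases hc : PySem.Int.floordiv n e ≠ e ∧ PySem.Int.floordiv n e ≠ n
          · simp [hmod, hne, hc, hle]
          · simp [hmod, hne, hc, hle]
      · simp [hmod, hle]
    · rw [dif_neg hle]
      simp [pvDs_nil n e he hle, pvCs_nil n e he hle]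

lemma pvMemDs (n x : Int) :
    x ∈ pvDs n 1 ↔ 1 ≤ x ∧ x * x ≤ n ∧ x ∣ n ∧ x ≠ n := by
  simp only [pvDs, List.mem_filter, PySem.List.mem_pyRange_one, Bool.and_eq_true,
    decide_eq_true_eq, beq_iff_eq, PySem.Int.mod_eq_zero_iff_dvd]
  constructor
  · rintro ⟨⟨h1, _⟩, ⟨hsq, hdvd⟩, hne⟩; exact ⟨h1, hsq, hdvd, hne⟩
  · rintro ⟨h1, hsq, hdvd, hne⟩
    exact ⟨⟨h1, by nlinarith⟩, ⟨hsq, hdvd⟩, hne⟩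

lemma pvMemCs (n x : Int) :
    x ∈ pvCs n 1 ↔ ∃ d, (1 ≤ d ∧ d * d ≤ n ∧ d ∣ n ∧
      PySem.Int.floordiv n d ≠ d ∧ PySem.Int.floordiv n d ≠ n) ∧
      PySem.Int.floordiv n d = x := by
  simp only [pvCs, List.mem_map, List.mem_filter, PySem.List.mem_pyRange_one, Bool.and_eq_true,
    decide_eq_true_eq, beq_iff_eq, PySem.Int.mod_eq_zero_iff_dvd]
  constructor
  · rintro ⟨d, ⟨⟨h1, _⟩, ⟨hsq, hdvd⟩, hc⟩, hx⟩; exact ⟨d, ⟨h1, hsq, hdvd, hc.1, hc.2⟩, hx⟩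
  · rintro ⟨d, ⟨h1, hsq, hdvd, hc1, hc2⟩, hx⟩
    exact ⟨d, ⟨⟨h1, by nlinarith⟩, ⟨hsq, hdvd⟩, hc1, hc2⟩, hx⟩

lemma pvMemDivsA (n x : Int) :
    x ∈ pvDivsA n ↔ 1 ≤ x ∧ x ≤ PySem.Int.floordiv n 2 ∧ x ∣ n := by
  simp only [pvDivsA, List.mem_filter, PySem.List.mem_pyRange_one, beq_iff_eq,
    PySem.Int.mod_eq_zero_iff_dvd, Int.lt_add_one_iff, and_assoc]

-- the two branches of the trial-division loop cover exactly A's divisor test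
lemma pvMemUnion (n x : Int) :
    ((1 ≤ x ∧ x * x ≤ n ∧ x ∣ n ∧ x ≠ n) ∨
     (∃ d, (1 ≤ d ∧ d * d ≤ n ∧ d ∣ n ∧
        PySem.Int.floordiv n d ≠ d ∧ PySem.Int.floordiv n d ≠ n) ∧
        PySem.Int.floordiv n d = x))
    ↔ (1 ≤ x ∧ x ≤ PySem.Int.floordiv n 2 ∧ x ∣ n) := by
  constructor
  · rintro (⟨h1, hsq, hdvd, hne⟩ | ⟨d, ⟨hd1, hdsq, hddvd, hne1, hne2⟩, rfl⟩)
    · obtain ⟨q, hq⟩ := hdvd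
      have hn1 : 1 ≤ n := by nlinarith
      have hq1 : 1 ≤ q := by nlinarith
      have hq2 : q ≠ 1 := fun h => hne (by rw [hq, h, mul_one])
      have hq3 : 2 ≤ q := by omega
      refine ⟨h1, ?_, ⟨q, hq⟩⟩
      rw [PySem.Int.le_floordiv_iff_mul_le (by norm_num)]
      nlinarith [mul_le_mul_of_nonneg_left hq3 (by omega : (0:Int) ≤ x)]
    · have hn1 : 1 ≤ n := by nlinarith
      rw [PySem.Int.floordiv_eq_ediv_of_pos (by omega)] at hne1 hne2 ⊢
      have hq : n / d * d = n := Int.ediv_mul_cancel hddvd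
      have hqd : d ≤ n / d := by nlinarith
      have hql : d < n / d := lt_of_le_of_ne hqd (Ne.symm hne1)
      have hd2 : 2 ≤ d := by
        rcases (by omega : d = 1 ∨ 2 ≤ d) with h | h
        · exfalso; apply hne2; rw [h, Int.ediv_one]
        · exact h
      refine ⟨by omega, ?_, ⟨d, hq.symm⟩⟩
      rw [PySem.Int.le_floordiv_iff_mul_le (by norm_num)]
      nlinarith
  · rintro ⟨h1, hle, hdvd⟩
    rw [PySem.Int.le_floordiv_iff_mul_le (by norm_num)] at hle
    have hxn : x < n := by omega
    by_cases hsq : x * x ≤ n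
    · exact Or.inl ⟨h1, hsq, hdvd, ne_of_lt hxn⟩
    · right
      obtain ⟨q, hq⟩ := hdvd
      have hq1 : 1 ≤ q := by nlinarith
      have hqx : q < x := by nlinarith
      have hfq : PySem.Int.floordiv n q = x := by
        rw [PySem.Int.floordiv_eq_ediv_of_pos (by omega), hq, Int.mul_ediv_cancel _ (by omega)]
      refine ⟨q, ⟨hq1, by nlinarith, ⟨x, by rw [hq, mul_comm]⟩, ?_, ?_⟩, hfq⟩
      · rw [hfq]; omega
      · rw [hfq]; omega

lemma pvPwDs (n : Int) : (pvDs n 1).Pairwise (· < ·) :=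
  List.Pairwise.sublist List.filter_sublist (PySem.List.pairwise_lt_pyRange_one 1 (n + 1))

lemma pvPwCs (n : Int) : (pvCs n 1).Pairwise (fun a b => b < a) := by
  rw [pvCs, List.pairwise_map]
  have hpw : (((PySem.List.pyRange 1 (n + 1) 1)).filter
      (fun d => decide (d * d ≤ n) && (PySem.Int.mod n d == 0) &&
        decide (PySem.Int.floordiv n d ≠ d ∧ PySem.Int.floordiv n d ≠ n))).Pairwise (· < ·) :=
    List.Pairwise.sublist List.filter_sublist (PySem.List.pairwise_lt_pyRange_one 1 (n + 1))
  refine hpw.imp_of_mem ?_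
  intro a b ha hb hab
  simp only [List.mem_filter, PySem.List.mem_pyRange_one, Bool.and_eq_true,
    decide_eq_true_eq, beq_iff_eq, PySem.Int.mod_eq_zero_iff_dvd] at ha hb
  obtain ⟨⟨ha1, _⟩, ⟨hasq, hadvd⟩, _⟩ := ha
  obtain ⟨⟨hb1, _⟩, ⟨hbsq, hbdvd⟩, _⟩ := hb
  have hn1 : 1 ≤ n := by nlinarith
  rw [PySem.Int.floordiv_eq_ediv_of_pos (by omega), PySem.Int.floordiv_eq_ediv_of_pos (by omega)]
  have hqa : n / a * a = n := Int.ediv_mul_cancel hadvd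
  have hqb : n / b * b = n := Int.ediv_mul_cancel hbdvd
  have hqa1 : 1 ≤ n / a := by nlinarith
  by_contra hcon
  push Not at hcon
  nlinarith

lemma pvCross (n x y : Int) (hx : x ∈ pvDs n 1) (hy : y ∈ pvCs n 1) : x < y := by
  rw [pvMemDs] at hx
  rw [pvMemCs] at hy
  obtain ⟨h1, hsq, _, _⟩ := hx
  obtain ⟨d, ⟨hd1, hdsq, hddvd, hne1, _⟩, rfl⟩ := hy
  have hn1 : 1 ≤ n := by nlinarith
  rw [PySem.Int.floordiv_eq_ediv_of_pos (by omega)] at hne1 ⊢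
  have hq : n / d * d = n := Int.ediv_mul_cancel hddvd
  have hqd : d ≤ n / d := by nlinarith
  have hql : d < n / d := lt_of_le_of_ne hqd (Ne.symm hne1)
  by_contra hcon
  push Not at hcon
  nlinarith

-- B's divisor list equals A's
lemma pvDivs_eq (n : Int) :
    (pvDivLoop n 1 [] []).1 ++ (pvDivLoop n 1 [] []).2.reverse = pvDivsA n := by
  rw [pvDivLoop_spec (n + 1 - 1).toNat n 1 [] [] (le_refl 1) (by omega)]
  simp only [List.nil_append]
  have hpw : (pvDs n 1 ++ (pvCs n 1).reverse).Pairwise (· < ·) := by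
    rw [List.pairwise_append]
    exact ⟨pvPwDs n, List.pairwise_reverse.2 (pvPwCs n),
      fun x hx y hy => pvCross n x y hx (List.mem_reverse.1 hy)⟩
  have hpwA : (pvDivsA n).Pairwise (· < ·) :=
    List.Pairwise.sublist List.filter_sublist
      (PySem.List.pairwise_lt_pyRange_one 1 (PySem.Int.floordiv n 2 + 1))
  have hmem : ∀ x, x ∈ pvDs n 1 ++ (pvCs n 1).reverse ↔ x ∈ pvDivsA n := by
    intro x
    rw [List.mem_append, List.mem_reverse, pvMemDs, pvMemCs, pvMemDivsA]
    exact pvMemUnion n x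
  have hperm : (pvDs n 1 ++ (pvCs n 1).reverse).Perm (pvDivsA n) :=
    (List.perm_ext_iff_of_nodup (hpw.imp ne_of_lt) (hpwA.imp ne_of_lt)).2 hmem
  have h1 := PySem.List.sorted_eq_of_perm_of_pairwise_lt (pvDivsA n)
    (pvDs n 1 ++ (pvCs n 1).reverse) (fun x => x) hperm hpw
  have h2 := PySem.List.sorted_eq_self_of_pairwise (pvDivsA n) (fun x => x) (hpwA.imp le_of_lt)
  exact h1.symm.trans h2

-- the divisor loop of port B, folded with Set.add, is a Set.update by pvInner
lemma pvMidB (n : Int) (s : PySem.Set Int) :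
    ((pvDivLoop n 1 [] []).1 ++ (pvDivLoop n 1 [] []).2.reverse).foldl
      (fun invalid elemlen =>
        (PySem.List.pyRange ((10 : Int) ^ (elemlen - 1).toNat) ((10 : Int) ^ elemlen.toNat) 1).foldl
          (fun invalid val => PySem.Set.add invalid (pvNum n elemlen val)) invalid) s
      = PySem.Set.update s ((pvDivsA n).flatMap (pvInner n)) := by
  rw [pvDivs_eq n,
      PySem.List.foldl_congr_mem _ _ (fun s e => PySem.Set.update s (pvInner n e)) _ ?_,
      pvUpdateFold]
  intro acc e _
  exact pvAddFold _ (pvNum n e) acc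

-- shape of port B: the same sequence, folded into a set
lemma pvShapeB (minlen maxlen : Int) :
    generate_invalid_ids_alt minlen maxlen = PySem.Set.ofList (pvGen minlen maxlen) := by
  have h1 := PySem.List.foldl_congr_mem (PySem.List.pyRange minlen (maxlen + 1) 1)
    (fun (invalid : PySem.Set Int) (numlen : Int) =>
      ((pvDivLoop numlen 1 [] []).1 ++ (pvDivLoop numlen 1 [] []).2.reverse).foldl
        (fun invalid elemlen =>
          (PySem.List.pyRange ((10 : Int) ^ (elemlen - 1).toNat) ((10 : Int) ^ elemlen.toNat) 1).foldl
            (fun invalid val => PySem.Set.add invalid (pvNum numlen elemlen val)) invalid) invalid)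
    (fun s n => PySem.Set.update s ((pvDivsA n).flatMap (pvInner n))) []
    (fun s n _ => pvMidB n s)
  have h2 := pvUpdateFold (PySem.List.pyRange minlen (maxlen + 1) 1)
    (fun n => (pvDivsA n).flatMap (pvInner n)) []
  exact (h1.trans h2).trans rfl

-- ===== VERDICT (by name: the statement is the Claim_ definition above) =====
theorem generate_invalid_ids_spec : Claim_equal_generate_invalid_ids := by
  intro minlen maxlen _
  unfold Spec_generate_invalid_ids
  rw [pvShapeA, pvShapeB]
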